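-- pv_equiv track=rewrite | github.com/emanuelefrassini/prediction_procedure_duration | tools/calculate_ensemble.py | find_closest_index
-- ===== SOURCE A (Python) =====
-- def find_closest_index(arr, target=100):
--     closest_index = None
--     closest_diff = float('inf')
--
--     for index, value in enumerate(arr):
--         diff = abs(value - target)
--         if diff < closest_diff:
--             closest_diff = diff
--             closest_index = index
--
--     return closest_index
-- ===== SOURCE B (Python) =====
-- def find_closest_index(arr, target=100):
--     diffs = [abs(v - target) for v in arr]
--     if not diffs:
--         return None
--     return diffs.index(min(diffs))
-- ===== Notes on version B (the rewrite author's own statement) =====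
-- stated objective: simpler
-- what changed: Replaces the single-pass best-index/best-diff accumulator loop with a staged pipeline: materialize the list of absolute differences, take its global min with the built-in min, then return the first index of that value via list.index (first occurrence matches A's first-wins tie-breaking).
import Mathlib
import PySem

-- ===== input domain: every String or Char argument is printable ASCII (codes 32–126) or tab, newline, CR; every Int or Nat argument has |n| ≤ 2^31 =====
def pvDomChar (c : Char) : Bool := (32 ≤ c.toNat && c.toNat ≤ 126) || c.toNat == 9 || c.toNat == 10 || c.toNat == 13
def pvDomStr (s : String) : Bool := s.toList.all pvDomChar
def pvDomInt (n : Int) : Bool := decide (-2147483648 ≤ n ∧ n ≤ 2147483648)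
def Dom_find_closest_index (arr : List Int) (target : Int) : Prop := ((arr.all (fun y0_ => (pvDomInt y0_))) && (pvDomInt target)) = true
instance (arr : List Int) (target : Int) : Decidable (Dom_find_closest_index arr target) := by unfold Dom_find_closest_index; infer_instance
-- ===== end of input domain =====

-- B replaces A's single-pass accumulator loop with a staged pipeline (diff list, global min,
-- first index of the min); same O(n) cost, same first-wins tie-breaking.

-- ===== PORT A =====
-- A's `closest_diff = float('inf')` is modelled as `none` (infinity): every integer diff
-- compares strictly below it, exactly as in Python (all diffs here are ints, never inf).
def find_closest_index (arr : List Int) (target : Int) : Option Int :=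
  (List.foldl
    (fun (st : Option Int × Option Int) (p : Int × Int) =>
      let diff := |p.2 - target|
      if (match st.2 with | none => true | some d => decide (diff < d)) then
        (some p.1, some diff)
      else st)
    (none, none) (PySem.List.enumerate arr 0)).1

-- ===== PORT B =====
def find_closest_index_alt (arr : List Int) (target : Int) : Option Int :=
  let diffs := arr.map (fun v => |v - target|)
  if diffs = [] then none
  else
    match PySem.List.min? diffs (fun x => x) with
    | none => none  -- unreachable: diffs is nonempty
    | some m => Option.map (fun j : Nat => (j : Int)) (PySem.List.index? diffs m)

-- ===== PRECONDITION & SPEC =====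
def Spec_find_closest_index (arr : List Int) (target : Int) (out : Option Int) : Prop := out = find_closest_index_alt arr target
instance (arr : List Int) (target : Int) (out : Option Int) : Decidable (Spec_find_closest_index arr target out) := by unfold Spec_find_closest_index; infer_instance

-- ===== CLAIM (what is proved, stated in full; the proofs are below) =====
def Claim_equal_find_closest_index : Prop := ∀ (arr : List Int) (target : Int), Dom_find_closest_index arr target → Spec_find_closest_index arr target (find_closest_index arr target)

-- ===== LEMMAS AND PROOFS =====

-- A's loop from a non-infinite state (some i, some b), scanning `enumerate xs k`: if some
-- element beats b the result is k + (first index of the overall minimum of the diffs),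
-- otherwise the incumbent i survives (strict `<` is first-wins).
theorem pv_fold_char (t : Int) (xs : List Int) :
    ∀ (i b k : Int),
    (List.foldl
      (fun (st : Option Int × Option Int) (p : Int × Int) =>
        if (match st.2 with | none => true | some d => decide (|p.2 - t| < d)) then
          (some p.1, some (|p.2 - t|))
        else st)
      (some i, some b) (PySem.List.enumerate xs k)).1 =
    (if xs.foldl (fun a y => min a (|y - t|)) b < b
     then Option.map (fun j : Nat => k + (j : Int)) (PySem.List.index? (xs.map (fun y => |y - t|)) (xs.foldl (fun a y => min a (|y - t|)) b))
     else some i) := by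
  induction xs with
  | nil => intro i b k; simp [PySem.List.enumerate]
  | cons y ys ih =>
    intro i b k
    rw [PySem.List.enumerate_cons]
    simp only [List.foldl, List.map, decide_eq_true_eq]
    by_cases h : |y - t| < b
    · rw [if_pos h]
      rw [ih k (|y - t|) (k + 1)]
      have hmin : min b (|y - t|) = |y - t| := by omega
      rw [hmin]
      have hle := (PySem.List.foldl_min_le (ys.map (fun y => |y - t|)) (|y - t|)).1
      rw [List.foldl_map] at hle
      by_cases h2 : ys.foldl (fun a y => min a (|y - t|)) (|y - t|) < |y - t|
      · have hne : |y - t| ≠ ys.foldl (fun a y => min a (|y - t|)) (|y - t|) := by omega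
        have hlt : ys.foldl (fun a y => min a (|y - t|)) (|y - t|) < b := by omega
        simp only [h2, if_true, hlt, if_true]
        rw [PySem.List.index?_cons_of_ne _ hne]
        cases hidx : PySem.List.index? (ys.map fun y => |y - t|) (ys.foldl (fun a y => min a (|y - t|)) (|y - t|)) with
        | none => simp
        | some j => simp; ring
      · have heq : ys.foldl (fun a y => min a (|y - t|)) (|y - t|) = |y - t| := by omega
        simp only [heq, h, if_true]
        rw [PySem.List.index?_cons_self]
        simp
    · rw [if_neg h]
      rw [ih i b (k + 1)]
      have hmin : min b (|y - t|) = b := by omega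
      rw [hmin]
      by_cases h2 : ys.foldl (fun a y => min a (|y - t|)) b < b
      · have hne : |y - t| ≠ ys.foldl (fun a y => min a (|y - t|)) b := by omega
        simp only [h2, if_true]
        rw [PySem.List.index?_cons_of_ne _ hne]
        cases hidx : PySem.List.index? (ys.map fun y => |y - t|) (ys.foldl (fun a y => min a (|y - t|)) b) with
        | none => simp
        | some j => simp; ring
      · simp only [h2, if_false]

theorem find_closest_index_agree (arr : List Int) (t : Int) :
    find_closest_index arr t = find_closest_index_alt arr t := by
  cases arr with
  | nil => rfl
  | cons x xs =>
    unfold find_closest_index find_closest_index_alt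
    rw [PySem.List.enumerate_cons]
    simp only [List.foldl, List.map, if_true]
    simp only [zero_add]
    rw [pv_fold_char t xs 0 (|x - t|) 1]
    have hcons : (|x - t| :: xs.map (fun v => |v - t|) : List Int) ≠ [] := by simp
    rw [if_neg hcons]
    rw [PySem.List.min?_id_cons]
    rw [List.foldl_map]
    have hle := (PySem.List.foldl_min_le (xs.map (fun y => |y - t|)) (|x - t|)).1
    rw [List.foldl_map] at hle
    by_cases h2 : xs.foldl (fun a y => min a (|y - t|)) (|x - t|) < |x - t|
    · have hne : |x - t| ≠ xs.foldl (fun a y => min a (|y - t|)) (|x - t|) := by omega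
      simp only [h2, if_true]
      rw [PySem.List.index?_cons_of_ne _ hne]
      cases hidx : PySem.List.index? (xs.map fun y => |y - t|) (xs.foldl (fun a y => min a (|y - t|)) (|x - t|)) with
      | none => simp
      | some j => simp; ring
    · have heq : xs.foldl (fun a y => min a (|y - t|)) (|x - t|) = |x - t| := by omega
      simp only [heq]
      rw [PySem.List.index?_cons_self]
      simp

-- ===== VERDICT (by name: the statement is the Claim_ definition above) =====
theorem find_closest_index_spec : Claim_equal_find_closest_index := by
  intro arr target _
  exact (find_closest_index_agree arr target).symm ▸ rfl
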